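-- pv_equiv track=rewrite | github.com/Raveen2001/Online-judges-solutions | Google/kickstart/speed_typing.py | getNumberOfExtraLettersTyped
-- ===== SOURCE A (Python) =====
-- def getNumberOfExtraLettersTyped(s, p):
--     pointer1 = 0
--     pointer2 = 0
--     while(pointer2 != len(p) and pointer1 != len(s)):
--         if(s[pointer1] == p[pointer2]):
--             pointer1 += 1
--         pointer2 += 1
--
--     if(pointer1 != len(s)):
--         return -1
--     else:
--         return len(p) - len(s)
-- ===== SOURCE B (Python) =====
-- def getNumberOfExtraLettersTyped(s, p):
--     # Build an index of occurrence positions per character of p, then greedily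
--     # match each character of s via binary search for the next usable position.
--     positions = {}
--     for i, c in enumerate(p):
--         positions.setdefault(c, []).append(i)
--     nxt = 0
--     for c in s:
--         idx_list = positions.get(c, [])
--         lo, hi = 0, len(idx_list)
--         while lo < hi:
--             mid = (lo + hi) // 2
--             if idx_list[mid] < nxt:
--                 lo = mid + 1
--             else:
--                 hi = mid
--         if lo == len(idx_list):
--             return -1
--         nxt = idx_list[lo] + 1
--     return len(p) - len(s)
-- ===== Notes on version B (the rewrite author's own statement) =====
-- stated objective: alternative
-- what changed: Instead of stepping two index pointers through p in lockstep, B first builds a dictionary mapping each character of p to its sorted list of occurrence positions, then matches each character of s by binary-searching that list for the first position not yet consumed; success still yields len(p)-len(s), failure -1.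
import Mathlib
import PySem

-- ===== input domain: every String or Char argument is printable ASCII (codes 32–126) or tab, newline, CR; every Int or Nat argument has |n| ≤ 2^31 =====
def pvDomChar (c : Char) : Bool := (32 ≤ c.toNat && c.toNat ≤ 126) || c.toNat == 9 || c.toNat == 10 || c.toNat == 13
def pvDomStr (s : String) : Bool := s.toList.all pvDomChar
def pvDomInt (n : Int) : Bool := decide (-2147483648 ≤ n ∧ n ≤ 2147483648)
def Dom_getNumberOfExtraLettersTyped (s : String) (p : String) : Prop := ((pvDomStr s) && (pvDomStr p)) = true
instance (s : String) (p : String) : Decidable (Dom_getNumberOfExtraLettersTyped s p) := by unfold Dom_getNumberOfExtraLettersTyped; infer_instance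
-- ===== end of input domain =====

-- B replaces A's lockstep two-pointer scan with a per-character occurrence index over p
-- plus a binary search for the next usable position (alternative algorithm, same results);
-- equivalence is proved for all inputs (both programs are total).

-- ===== PORT A =====
-- A's while loop, step for step: state is (pointer1, pointer2); the Python guard
-- `pointer2 != len(p) and pointer1 != len(s)` is written as `<` (equivalent here, since the
-- pointers start at 0 and only ever step by 1 up to the lengths), which also gives termination.
-- the loop runs at most len(p) - pointer2 more iterations; that bound is the structural
-- fuel (p.length - p2), everything else is the Python loop body verbatim.
def pvLoopAF (s p : List Char) : Nat → Nat → Nat → Nat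
  | 0, p1, _ => p1
  | fuel + 1, p1, p2 =>
    if p2 < p.length ∧ p1 < s.length then
      if s.getD p1 ' ' = p.getD p2 ' ' then pvLoopAF s p fuel (p1 + 1) (p2 + 1)
      else pvLoopAF s p fuel p1 (p2 + 1)
    else p1

def pvLoopA (s p : List Char) (p1 p2 : Nat) : Nat :=
  pvLoopAF s p (p.length - p2) p1 p2

def getNumberOfExtraLettersTyped (s : String) (p : String) : Int :=
  let sl := s.toList
  let pl := p.toList
  let pointer1 := pvLoopA sl pl 0 0
  if pointer1 ≠ sl.length then -1
  else (pl.length : Int) - (sl.length : Int)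

-- ===== PORT B =====
-- the dict build: for i, c in enumerate(p): positions.setdefault(c, []).append(i)
-- (setdefault-then-append = modify with default []).
def pvBuildPos (p : List Char) : PySem.Dict Char (List Int) :=
  (PySem.List.enumerate p 0).foldl (fun d ic => d.modify ic.2 [] (· ++ [ic.1])) PySem.Dict.empty

-- the inner while loop: standard lower-bound binary search for the first position ≥ nxt.
-- idx_list[mid] is ported as getD (exact: the loop only reads mid with lo ≤ mid < hi ≤ length).
-- the while loop halves hi - lo each round, so hi - lo bounds the iterations; that bound
-- is the structural fuel, the loop body is Source B's verbatim.
def pvBisectF (l : List Int) (nxt : Int) : Nat → Nat → Nat → Nat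
  | 0, lo, _ => lo
  | fuel + 1, lo, hi =>
    if lo < hi then
      let mid := (lo + hi) / 2
      if l.getD mid 0 < nxt then pvBisectF l nxt fuel (mid + 1) hi
      else pvBisectF l nxt fuel lo mid
    else lo

def pvBisect (l : List Int) (nxt : Int) (lo hi : Nat) : Nat :=
  pvBisectF l nxt (hi - lo) lo hi

-- the for loop over s, with its early returns, as recursion over s's characters.
def pvLoopB (pos : PySem.Dict Char (List Int)) (plen slen : Int) : List Char → Int → Int
  | [], _ => plen - slen
  | c :: cs, nxt =>
    let idxList := pos.getD c []
    let lo := pvBisect idxList nxt 0 idxList.length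
    if lo = idxList.length then -1
    else pvLoopB pos plen slen cs (idxList.getD lo 0 + 1)

def getNumberOfExtraLettersTyped_alt (s : String) (p : String) : Int :=
  let positions := pvBuildPos p.toList
  pvLoopB positions (p.toList.length : Int) (s.toList.length : Int) s.toList 0

-- ===== PRECONDITION & SPEC =====
def Spec_getNumberOfExtraLettersTyped (s : String) (p : String) (out : Int) : Prop := out = getNumberOfExtraLettersTyped_alt s p
instance (s : String) (p : String) (out : Int) : Decidable (Spec_getNumberOfExtraLettersTyped s p out) := by unfold Spec_getNumberOfExtraLettersTyped; infer_instance

-- ===== CLAIM (what is proved, stated in full; the proofs are below) =====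
def Claim_equal_getNumberOfExtraLettersTyped : Prop := ∀ (s : String) (p : String), Dom_getNumberOfExtraLettersTyped s p → Spec_getNumberOfExtraLettersTyped s p (getNumberOfExtraLettersTyped s p)

-- ===== LEMMAS AND PROOFS =====

-- Proof-side middle ground: the greedy one-suffix-at-a-time subsequence match.
def pvFindIn (c : Char) : List Char → Option (List Char)
  | [] => none
  | x :: xs => if x = c then some xs else pvFindIn c xs

def pvAllIn : List Char → List Char → Bool
  | [], _ => true
  | c :: cs, rest =>
    match pvFindIn c rest with
    | none => false
    | some rest' => pvAllIn cs rest'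

-- A's two-pointer loop reaches the end of s exactly when the greedy match succeeds on suffixes.
theorem pvLoopAF_eq_allIn : ∀ (ps ss s p : List Char) (p1 p2 : Nat),
    s.drop p1 = ss → p.drop p2 = ps → p1 ≤ s.length → p2 ≤ p.length →
    (pvLoopAF s p ps.length p1 p2 = s.length ↔ pvAllIn ss ps = true) := by
  intro ps
  induction ps with
  | nil =>
    intro ss s p p1 p2 hs hp hp1 hp2
    simp only [List.length_nil, pvLoopAF]
    cases ss with
    | nil =>
      have : s.length ≤ p1 := List.drop_eq_nil_iff.mp hs
      have : p1 = s.length := by omega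
      simp [this, pvAllIn]
    | cons c cs =>
      have hlt : p1 < s.length := by
        by_contra hge
        have : s.drop p1 = [] := List.drop_eq_nil_iff.mpr (by omega)
        rw [this] at hs; simp at hs
      constructor
      · intro h; omega
      · intro h; simp [pvAllIn, pvFindIn] at h
  | cons x ps' ih =>
    intro ss s p p1 p2 hs hp hp1 hp2
    have hp2lt : p2 < p.length := by
      by_contra hge
      have : p.drop p2 = [] := List.drop_eq_nil_iff.mpr (by omega)
      rw [this] at hp; simp at hp
    have hpx : p.getD p2 ' ' = x := by
      have h0 : (p.drop p2).getD 0 ' ' = x := by rw [hp]; rfl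
      simpa [List.getD, List.getElem?_drop] using h0
    have hptail : p.drop (p2 + 1) = ps' := by
      have : p.drop (p2 + 1) = (p.drop p2).drop 1 := by rw [List.drop_drop]
      rw [this, hp]; rfl
    cases ss with
    | nil =>
      have : s.length ≤ p1 := List.drop_eq_nil_iff.mp hs
      have hp1eq : p1 = s.length := by omega
      simp only [List.length_cons, pvLoopAF]
      rw [if_neg (by omega)]
      simp [hp1eq, pvAllIn]
    | cons c cs =>
      have hp1lt : p1 < s.length := by
        by_contra hge
        have : s.drop p1 = [] := List.drop_eq_nil_iff.mpr (by omega)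
        rw [this] at hs; simp at hs
      have hsc : s.getD p1 ' ' = c := by
        have h0 : (s.drop p1).getD 0 ' ' = c := by rw [hs]; rfl
        simpa [List.getD, List.getElem?_drop] using h0
      have hstail : s.drop (p1 + 1) = cs := by
        have : s.drop (p1 + 1) = (s.drop p1).drop 1 := by rw [List.drop_drop]
        rw [this, hs]; rfl
      simp only [List.length_cons, pvLoopAF]
      rw [if_pos ⟨hp2lt, hp1lt⟩]
      simp only [hsc, hpx]
      by_cases hcx : c = x
      · simp only [hcx, if_true]
        rw [ih cs s p (p1 + 1) (p2 + 1) hstail hptail (by omega) (by omega)]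
        simp [pvAllIn, pvFindIn]
      · simp only [hcx, if_false]
        rw [ih (c :: cs) s p p1 (p2 + 1) hs hptail (by omega) (by omega)]
        have hxc : ¬ x = c := fun h => hcx h.symm
        have : pvFindIn c (x :: ps') = pvFindIn c ps' := by simp [pvFindIn, hxc]
        simp [pvAllIn, this]

theorem pvLoopA_eq_allIn : ∀ (ps ss s p : List Char) (p1 p2 : Nat),
    s.drop p1 = ss → p.drop p2 = ps → p1 ≤ s.length → p2 ≤ p.length →
    (pvLoopA s p p1 p2 = s.length ↔ pvAllIn ss ps = true) := by
  intro ps ss s p p1 p2 hs hp hp1 hp2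
  have hf : p.length - p2 = ps.length := by rw [← hp]; simp
  unfold pvLoopA
  rw [hf]
  exact pvLoopAF_eq_allIn ps ss s p p1 p2 hs hp hp1 hp2

-- pvOccI c i q = the positions (counted from i) of the occurrences of c in q.
def pvOccI (c : Char) (i : Int) : List Char → List Int
  | [] => []
  | x :: xs => if x = c then i :: pvOccI c (i + 1) xs else pvOccI c (i + 1) xs

theorem pvOccI_split (c : Char) : ∀ (q : List Char) (i : Int) (n : Nat),
    pvOccI c i q = pvOccI c i (q.take n) ++ pvOccI c (i + n) (q.drop n) := by
  intro q
  induction q with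
  | nil => intro i n; simp [pvOccI]
  | cons x xs ih =>
    intro i n
    cases n with
    | zero => simp [pvOccI]
    | succ m =>
      simp only [List.take_succ_cons, List.drop_succ_cons, pvOccI]
      by_cases hx : x = c
      all_goals {
        simp only [hx, if_true, if_false, List.cons_append]
        rw [ih (i+1) m]
        have he : i + 1 + (m : Int) = i + ((m + 1 : Nat) : Int) := by push_cast; ring
        rw [he] }

theorem pvOccI_bounds (c : Char) : ∀ (q : List Char) (i : Int) (m : Int),
    m ∈ pvOccI c i q → i ≤ m ∧ m < i + q.length := by
  intro q
  induction q with
  | nil => intro i m h; simp [pvOccI] at h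
  | cons x xs ih =>
    intro i m h
    simp only [pvOccI] at h
    by_cases hx : x = c
    · rw [if_pos hx] at h
      rcases List.mem_cons.mp h with rfl | h'
      · simp only [List.length_cons]; push_cast; omega
      · have := ih (i+1) m h'
        simp only [List.length_cons]; push_cast; omega
    · rw [if_neg hx] at h
      have := ih (i+1) m h
      simp only [List.length_cons]; push_cast; omega

theorem pvOccI_head (c : Char) : ∀ (q : List Char) (i : Int),
    (pvOccI c i q = [] ∧ pvFindIn c q = none) ∨
      (∃ (k : Nat) (rest : List Int), pvOccI c i q = (i + k) :: rest ∧ k < q.length ∧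
        pvFindIn c q = some (q.drop (k + 1))) := by
  intro q
  induction q with
  | nil => intro i; left; exact ⟨rfl, rfl⟩
  | cons x xs ih =>
    intro i
    by_cases hx : x = c
    · right
      refine ⟨0, pvOccI c (i+1) xs, ?_, by simp, ?_⟩
      · simp [pvOccI, hx]
      · simp [pvFindIn, hx]
    · rcases ih (i+1) with ⟨h1, h2⟩ | ⟨k, rest, h1, h2, h3⟩
      · left
        constructor
        · simp [pvOccI, hx, h1]
        · simp [pvFindIn, hx, h2]
      · right
        refine ⟨k + 1, rest, ?_, by simp; omega, ?_⟩
        · simp only [pvOccI, hx, if_false, h1]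
          congr 1
          push_cast; ring
        · simp [pvFindIn, hx, h3]

theorem pvFoldlMap {α β γ : Type} (g : β → γ) (f : α → γ → α) :
    ∀ (l : List β) (init : α), (l.map g).foldl f init = l.foldl (fun x y => f x (g y)) init := by
  intro l
  induction l with
  | nil => intro init; rfl
  | cons x xs ih => intro init; simp only [List.map_cons, List.foldl_cons, ih]

theorem pvGetD_append_len (B : List Int) : ∀ (A : List Int),
    (A ++ B).getD A.length 0 = B.getD 0 0 := by
  intro A
  induction A with
  | nil => rfl
  | cons x A ih => simpa [List.getD_cons_succ] using ih

theorem pvOccI_enum (c : Char) : ∀ (q : List Char) (i : Int),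
    ((((PySem.List.enumerate q i).map (fun ic => (ic.2, ic.1))).filter
        (fun pr => pr.1 == c)).map (·.2)) = pvOccI c i q := by
  intro q
  induction q with
  | nil => intro i; simp [PySem.List.enumerate_nil, pvOccI]
  | cons x xs ih =>
    intro i
    rw [PySem.List.enumerate_cons]
    by_cases hx : x = c
    · simp [pvOccI, hx, ih (i + 1)]
    · simp [pvOccI, hx, ih (i + 1)]

theorem pvBuildPos_getD (p : List Char) (c : Char) :
    (pvBuildPos p).getD c [] = pvOccI c 0 p := by
  unfold pvBuildPos
  have hmap : (PySem.List.enumerate p 0).foldl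
      (fun d ic => d.modify ic.2 [] (· ++ [ic.1])) PySem.Dict.empty
      = ((PySem.List.enumerate p 0).map (fun ic => (ic.2, ic.1))).foldl
          (fun d q => d.modify q.1 [] (· ++ [q.2])) PySem.Dict.empty :=
    (pvFoldlMap (fun ic => (ic.2, ic.1)) (fun d q => d.modify q.1 [] (· ++ [q.2]))
      (PySem.List.enumerate p 0) PySem.Dict.empty).symm
  rw [hmap, PySem.Dict.getD_foldl_modify_append, PySem.Dict.getD_empty,
      List.nil_append, pvOccI_enum]

theorem pvBisectF_split (l a b : List Int) (n : Int)
    (hl : l = a ++ b) (ha : ∀ x ∈ a, x < n) (hb : ∀ x ∈ b, n ≤ x) :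
    ∀ (d lo hi : Nat), hi - lo ≤ d → lo ≤ a.length → a.length ≤ hi → hi ≤ l.length →
      pvBisectF l n d lo hi = a.length := by
  intro d
  induction d with
  | zero =>
    intro lo hi hfuel h1 h2 h3
    simp only [pvBisectF]
    omega
  | succ d ih =>
    intro lo hi hfuel h1 h2 h3
    simp only [pvBisectF]
    by_cases hlh : lo < hi
    · rw [if_pos hlh]
      have hmidlo : lo ≤ (lo + hi) / 2 := by omega
      have hmidhi : (lo + hi) / 2 < hi := by omega
      have hmidlen : (lo + hi) / 2 < l.length := by omega
      by_cases hv : l.getD ((lo + hi) / 2) 0 < n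
      · rw [if_pos hv]
        have hmida : (lo + hi) / 2 < a.length := by
          by_contra hge
          have hbmem : l.getD ((lo + hi) / 2) 0 ∈ b := by
            rw [List.getD_eq_getElem l 0 hmidlen]
            subst hl
            rw [List.getElem_append_right (by omega)]
            exact List.getElem_mem _
          exact absurd (hb _ hbmem) (by omega)
        exact ih ((lo + hi) / 2 + 1) hi (by omega) (by omega) (by omega) h3
      · rw [if_neg hv]
        have hmida : a.length ≤ (lo + hi) / 2 := by
          by_contra hlt
          have hamem : l.getD ((lo + hi) / 2) 0 ∈ a := by
            rw [List.getD_eq_getElem l 0 hmidlen]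
            subst hl
            rw [List.getElem_append_left (by omega)]
            exact List.getElem_mem _
          exact absurd (ha _ hamem) (by omega)
        exact ih lo ((lo + hi) / 2) (by omega) h1 hmida (by omega)
    · rw [if_neg hlh]
      omega

theorem pvBisect_split (l a b : List Int) (n : Int)
    (hl : l = a ++ b) (ha : ∀ x ∈ a, x < n) (hb : ∀ x ∈ b, n ≤ x) :
    ∀ (lo hi : Nat), lo ≤ a.length → a.length ≤ hi → hi ≤ l.length →
      pvBisect l n lo hi = a.length := by
  intro lo hi h1 h2 h3
  unfold pvBisect
  exact pvBisectF_split l a b n hl ha hb (hi - lo) lo hi (le_refl _) h1 h2 h3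

theorem pvLoopB_eq_allIn (p : List Char) (plen slen : Int) :
    ∀ (cs : List Char) (n : Nat), n ≤ p.length →
      pvLoopB (pvBuildPos p) plen slen cs (n : Int) =
        if pvAllIn cs (p.drop n) then plen - slen else -1 := by
  intro cs
  induction cs with
  | nil => intro n hn; simp [pvLoopB, pvAllIn]
  | cons c cs ih =>
    intro n hn
    rw [pvLoopB]
    simp only [pvBuildPos_getD]
    have hsplit : pvOccI c 0 p = pvOccI c 0 (p.take n) ++ pvOccI c (n : Int) (p.drop n) := by
      have := pvOccI_split c p 0 n
      simpa using this
    have ha : ∀ x ∈ pvOccI c 0 (p.take n), x < (n : Int) := by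
      intro x hx
      have := pvOccI_bounds c (p.take n) 0 x hx
      have hlen : (p.take n).length ≤ n := by simp
      have : x < ((p.take n).length : Int) := by omega
      omega
    have hb : ∀ x ∈ pvOccI c (n : Int) (p.drop n), (n : Int) ≤ x := by
      intro x hx
      exact (pvOccI_bounds c (p.drop n) (n : Int) x hx).1
    have hlenocc : (pvOccI c 0 p).length
        = (pvOccI c 0 (p.take n)).length + (pvOccI c (n : Int) (p.drop n)).length := by
      rw [hsplit, List.length_append]
    have hbis := pvBisect_split (pvOccI c 0 p) (pvOccI c 0 (p.take n))
      (pvOccI c (n : Int) (p.drop n)) (n : Int) hsplit ha hb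
      0 (pvOccI c 0 p).length (by omega) (by omega) (by omega)
    rcases pvOccI_head c (p.drop n) (n : Int) with ⟨hB0, hF⟩ | ⟨k, rest, hB, hk, hF⟩
    · -- no occurrence of c at position ≥ n : both sides give -1
      have hAeq : (pvOccI c 0 (p.take n)).length = (pvOccI c 0 p).length := by
        rw [hB0] at hlenocc; simp at hlenocc; omega
      rw [hbis, if_pos hAeq]
      have : pvAllIn (c :: cs) (p.drop n) = false := by
        rw [pvAllIn, hF]
      rw [this]
      simp
    · -- first occurrence is at position n + k
      have hBlen : 0 < (pvOccI c (n : Int) (p.drop n)).length := by rw [hB]; simp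
      have hne : (pvOccI c 0 (p.take n)).length ≠ (pvOccI c 0 p).length := by omega
      rw [hbis, if_neg hne]
      have hget : (pvOccI c 0 p).getD (pvOccI c 0 (p.take n)).length 0 = (n : Int) + k := by
        rw [hsplit, pvGetD_append_len, hB]
        rfl
      rw [hget]
      have hcast : (n : Int) + k + 1 = ((n + k + 1 : Nat) : Int) := by push_cast; ring
      rw [hcast]
      have hdroplen : (p.drop n).length = p.length - n := by simp
      have hih := ih (n + k + 1) (by omega)
      rw [hih]
      have hdd : (p.drop n).drop (k + 1) = p.drop (n + k + 1) := by
        rw [List.drop_drop, Nat.add_succ]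
      have hall : pvAllIn (c :: cs) (p.drop n) = pvAllIn cs (p.drop (n + k + 1)) := by
        rw [pvAllIn, hF, hdd]
      rw [hall]

-- ===== VERDICT (by name: the statement is the Claim_ definition above) =====
theorem getNumberOfExtraLettersTyped_spec : Claim_equal_getNumberOfExtraLettersTyped := by
  intro s p _
  unfold Spec_getNumberOfExtraLettersTyped getNumberOfExtraLettersTyped getNumberOfExtraLettersTyped_alt
  have hB := pvLoopB_eq_allIn p.toList (p.toList.length : Int) (s.toList.length : Int)
      s.toList 0 (Nat.zero_le _)
  have hA := pvLoopA_eq_allIn p.toList s.toList s.toList p.toList 0 0 rfl rfl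
    (Nat.zero_le _) (Nat.zero_le _)
  simp only [List.drop_zero, Nat.cast_zero] at hB
  rw [hB]
  by_cases hall : pvAllIn s.toList p.toList = true
  · have h1 : pvLoopA s.toList p.toList 0 0 = s.toList.length := hA.mpr hall
    rw [if_pos hall]
    simp [h1]
  · have hne : pvLoopA s.toList p.toList 0 0 ≠ s.toList.length := fun he => hall (hA.mp he)
    have hne' : pvLoopA s.toList p.toList 0 0 ≠ s.length := by simpa using hne
    rw [if_neg hall]
    simp [hne']
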